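-- pv_equiv track=rewrite | github.com/YuHyeonGeun-KOR/My-Algorithm-Journey | summer/2.py | solution
-- ===== SOURCE A (Python) =====
-- from collections import deque
--
-- def solution(t, r):
--     answer = []
--     new = []
--     for i in range(len(t)):
--         new.append([t[i],r[i]])
--     new = sorted(new, key = lambda x : (x[0],x[1]))
--     new_que = deque(new)
--
--
--     for i in range(len(new_que)-1):
--         temp = new_que.popleft()
--         temp2= new_que.popleft()
--         if temp[0] == temp2[0]:
--             temp2[0] += 1
--             answer.append(temp[1])
--             new_que.appendleft(temp2)
--         else:
--             new_que.appendleft(temp)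
--             answer.append(temp2[1])
--         new_que = sorted(new_que, key = lambda x : (x[0],x[1]))
--         new_que = deque(new_que)
--
--     temp = new_que.popleft()
--     answer.append(temp[1])
--     return answer
-- ===== SOURCE B (Python) =====
-- def solution(t, r):
--     q = sorted(zip(t, r))
--     out = []
--     while len(q) > 1:
--         a, b = q[0], q[1]
--         if a[0] == b[0]:
--             out.append(a[1])
--             x = (b[0] + 1, b[1])
--             del q[:2]
--             lo, hi = 0, len(q)
--             while lo < hi:              # bisect_left by hand: first index with q[mid] >= x
--                 mid = (lo + hi) // 2
--                 if q[mid] < x: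
--                     lo = mid + 1
--                 else:
--                     hi = mid
--             q.insert(lo, x)
--         else:
--             out.append(b[1])
--             del q[1]
--     out.append(q[0][1])
--     return out
-- ===== Notes on version B (the rewrite author's own statement) =====
-- stated objective: faster
-- what changed: Instead of re-sorting the whole queue and rebuilding a deque after every step, B keeps one sorted list and performs per step a single binary-search (bisect_left by hand) insertion in the tie branch or an in-place deletion of the second element otherwise.
import Mathlib
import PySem

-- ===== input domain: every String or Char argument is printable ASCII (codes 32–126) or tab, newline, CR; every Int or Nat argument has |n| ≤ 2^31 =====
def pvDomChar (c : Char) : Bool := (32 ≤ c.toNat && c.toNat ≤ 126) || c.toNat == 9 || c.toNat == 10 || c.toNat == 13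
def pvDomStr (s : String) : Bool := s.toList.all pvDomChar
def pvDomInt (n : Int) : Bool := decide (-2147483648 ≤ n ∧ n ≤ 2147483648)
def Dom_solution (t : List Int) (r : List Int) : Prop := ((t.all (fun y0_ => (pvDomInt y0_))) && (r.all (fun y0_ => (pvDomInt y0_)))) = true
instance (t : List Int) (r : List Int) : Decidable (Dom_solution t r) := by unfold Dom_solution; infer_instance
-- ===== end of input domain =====

-- B replaces A's per-step full re-sort + deque rebuild by keeping one sorted list and
-- doing a single binary-search insertion (tie branch) or deletion (other branch) per step.


-- ===== PORT A =====
-- one iteration of A's for-loop: pop two smallest, branch, re-sort the deque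
def aStep (s : List Int × List (Int × Int)) : List Int × List (Int × Int) :=
  match s with
  | (ans, a :: b :: rest) =>
      if a.1 == b.1 then
        (ans ++ [a.2], PySem.List.sorted2 ((b.1 + 1, b.2) :: rest) (fun x => x.1) (fun x => x.2))
      else
        (ans ++ [b.2], PySem.List.sorted2 (a :: rest) (fun x => x.1) (fun x => x.2))
  | (ans, q) => (ans, q)   -- fewer than 2 elements: Python's popleft raises (excluded by Pre_)

-- 'for i in range(len(new_que)-1)': k iterations of aStep
def aLoop : Nat → List Int × List (Int × Int) → List Int × List (Int × Int)
  | 0, s => s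
  | k + 1, s => aLoop k (aStep s)

def aFinish (res : List Int × List (Int × Int)) : List Int :=
  match res.2 with
  | m :: _ => res.1 ++ [m.2]
  | [] => res.1   -- final popleft on an empty deque raises (excluded by Pre_)

def solution (t : List Int) (r : List Int) : List Int :=
  aFinish (aLoop
    ((PySem.List.sorted2 ((PySem.List.pyRange 0 (PySem.List.len t) 1).foldl
        (fun acc i => acc ++ [(PySem.List.pyGetD t i 0, PySem.List.pyGetD r i 0)]) [])
      (fun x => x.1) (fun x => x.2)).length - 1)
    ([], PySem.List.sorted2 ((PySem.List.pyRange 0 (PySem.List.len t) 1).foldl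
        (fun acc i => acc ++ [(PySem.List.pyGetD t i 0, PySem.List.pyGetD r i 0)]) [])
      (fun x => x.1) (fun x => x.2)))

-- ===== PORT B =====
-- B's hand-written bisect_left: 'while lo < hi: mid = (lo+hi)//2; if q[mid] < x: lo = mid+1 else: hi = mid'
-- (q[mid] < x is Python's lexicographic tuple comparison, written out)
def bisect (q : List (Int × Int)) (x : Int × Int) (lo hi : Int) : Int :=
  if h : lo < hi then
    let mid := PySem.Int.floordiv (lo + hi) 2
    if (PySem.List.pyGetD q mid (0, 0)).1 < x.1
        ∨ ((PySem.List.pyGetD q mid (0, 0)).1 = x.1 ∧ (PySem.List.pyGetD q mid (0, 0)).2 < x.2) then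
      bisect q x (mid + 1) hi
    else
      bisect q x lo mid
  else lo
termination_by (hi - lo).toNat
decreasing_by
  · have h1 := (PySem.Int.le_floordiv_iff_mul_le (a := lo + hi) (b := 2) (q := lo) (by norm_num)).mpr (by omega)
    omega
  · have h2 := (PySem.Int.floordiv_lt_iff_lt_mul (a := lo + hi) (b := 2) (q := hi) (by norm_num)).mpr (by omega)
    omega

-- 'while len(q) > 1: …' of B (del q[:2] / del q[1] / q.insert(lo, x) done on the match)
def altLoop (out : List Int) (q : List (Int × Int)) : List Int :=
  match q with
  | a :: b :: rest =>
      if a.1 == b.1 then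
        altLoop (out ++ [a.2])
          (PySem.List.insert rest (bisect rest (b.1 + 1, b.2) 0 (PySem.List.len rest)) (b.1 + 1, b.2))
      else
        altLoop (out ++ [b.2]) (a :: rest)
  | [m] => out ++ [m.2]
  | [] => out   -- q[0] on an empty list raises in Python (excluded by Pre_)
termination_by q.length
decreasing_by
  · simp [PySem.List.length_insert]
  · simp

def solution_alt (t : List Int) (r : List Int) : List Int :=
  altLoop [] (PySem.List.sorted2 (t.zip r) (fun x => x.1) (fun x => x.2))

-- ===== PRECONDITION & SPEC =====
-- Pre_ excludes exactly the inputs where A raises: t = [] (popleft/IndexError at the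
-- end) and len(r) < len(t) (r[i] IndexError while pairing).
def Pre_solution (t : List Int) (r : List Int) : Prop := t ≠ [] ∧ t.length ≤ r.length
instance (t : List Int) (r : List Int) : Decidable (Pre_solution t r) := by unfold Pre_solution; infer_instance
def pvWitness_solution : List Int × List Int := ([1, 1, 2], [5, 6, 7])

def Spec_solution (t : List Int) (r : List Int) (out : List Int) : Prop := out = solution_alt t r
instance (t : List Int) (r : List Int) (out : List Int) : Decidable (Spec_solution t r out) := by unfold Spec_solution; infer_instance

-- ===== CLAIM (what is proved, stated in full; the proofs are below) =====
def Claim_equal_solution : Prop := ∀ (t : List Int) (r : List Int), Dom_solution t r → Pre_solution t r → Spec_solution t r (solution t r)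

-- ===== LEMMAS AND PROOFS =====

-- lexicographic ≤ / < on pairs, the order both programs sort by
def lexLe (a b : Int × Int) : Prop := a.1 < b.1 ∨ (a.1 = b.1 ∧ a.2 ≤ b.2)
def lexLt (a b : Int × Int) : Prop := a.1 < b.1 ∨ (a.1 = b.1 ∧ a.2 < b.2)

theorem lexLe_antisymm (a b : Int × Int) : lexLe a b → lexLe b a → a = b := by
  unfold lexLe
  rcases a with ⟨a1, a2⟩; rcases b with ⟨b1, b2⟩
  simp only [Prod.mk.injEq]
  omega

theorem lexLe_trans (a b c : Int × Int) : lexLe a b → lexLe b c → lexLe a c := by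
  unfold lexLe; omega

theorem lexLe_refl (a : Int × Int) : lexLe a a := by unfold lexLe; omega

theorem lexLt_le (a b : Int × Int) : lexLt a b → lexLe a b := by unfold lexLt lexLe; omega

theorem not_lexLt (a b : Int × Int) : ¬ lexLt a b → lexLe b a := by unfold lexLt lexLe; omega

theorem lexLe_lexLt_trans (a b c : Int × Int) : lexLe a b → lexLt b c → lexLt a c := by
  unfold lexLe lexLt; omega

-- two permuted lexLe-ordered lists are equal
theorem eq_of_perm_of_pairwise (l₁ l₂ : List (Int × Int)) (hp : l₁.Perm l₂)
    (h₁ : l₁.Pairwise lexLe) (h₂ : l₂.Pairwise lexLe) : l₁ = l₂ :=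
  List.Perm.eq_of_pairwise (fun a b _ _ => lexLe_antisymm a b) h₁ h₂ hp

-- the Bool comparison sorted2 uses, unfolded
theorem insertBy_pairwise (x : Int × Int) (ys : List (Int × Int)) (h : ys.Pairwise lexLe) :
    (PySem.List.insertBy
      (fun a b => decide (a.1 < b.1) || (!decide (b.1 < a.1) && decide (a.2 < b.2))) x ys).Pairwise lexLe := by
  induction ys with
  | nil => simp [PySem.List.insertBy, lexLe]
  | cons y ys ih =>
    simp only [PySem.List.insertBy]
    rcases h with _ | ⟨hy, hys⟩
    split
    · rename_i hlt
      refine List.Pairwise.cons ?_ (List.Pairwise.cons hy hys)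
      intro z hz
      simp only [Bool.or_eq_true, Bool.and_eq_true, decide_eq_true_eq, Bool.not_eq_eq_eq_not,
        Bool.not_true, decide_eq_false_iff_not] at hlt
      have hxy : lexLe x y := by unfold lexLe; omega
      rcases List.mem_cons.mp hz with hz | hz
      · exact hz ▸ hxy
      · exact lexLe_trans _ _ _ hxy (hy z hz)
    · rename_i hlt
      refine List.Pairwise.cons ?_ (ih hys)
      intro z hz
      have hyx : lexLe y x := by
        simp only [Bool.or_eq_true, Bool.and_eq_true, decide_eq_true_eq, Bool.not_eq_eq_eq_not,
          Bool.not_true, decide_eq_false_iff_not] at hlt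
        unfold lexLe; omega
      rcases (PySem.List.mem_insertBy _ x z ys).mp hz with hz | hz
      · exact hz ▸ hyx
      · exact hy z hz

theorem sorted2_pairwise_lex (xs : List (Int × Int)) :
    (PySem.List.sorted2 xs (fun x => x.1) (fun x => x.2) false).Pairwise lexLe := by
  suffices h : ∀ acc : List (Int × Int), acc.Pairwise lexLe →
      (xs.foldl (fun acc x => PySem.List.insertBy
        (fun a b => decide (a.1 < b.1) || (!decide (b.1 < a.1) && decide (a.2 < b.2))) x acc) acc).Pairwise lexLe by
    exact h [] (by simp)
  induction xs with
  | nil => intro acc hacc; exact hacc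
  | cons x xs ih =>
    intro acc hacc
    exact ih _ (insertBy_pairwise x acc hacc)

theorem sorted2_eq_self (xs : List (Int × Int)) (h : xs.Pairwise lexLe) :
    PySem.List.sorted2 xs (fun y => y.1) (fun y => y.2) false = xs :=
  eq_of_perm_of_pairwise _ _ (PySem.List.sorted2_perm _ _ _ _) (sorted2_pairwise_lex _) h

-- Pairwise gives monotonicity on positions
theorem getD_mono (q : List (Int × Int)) (hq : q.Pairwise lexLe) (i j : Nat)
    (hij : i ≤ j) (hj : j < q.length) :
    lexLe (q.getD i (0, 0)) (q.getD j (0, 0)) := by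
  rcases Nat.lt_or_ge i j with h | h
  · rw [List.getD_eq_getElem _ _ (Nat.lt_of_le_of_lt hij hj), List.getD_eq_getElem _ _ hj]
    exact List.pairwise_iff_getElem.mp hq i j _ _ h
  · have : i = j := by omega
    subst this
    exact lexLe_refl _

-- B's hand-written binary search finds a bisect_left position
theorem bisect_spec (q : List (Int × Int)) (x : Int × Int) (hq : q.Pairwise lexLe) :
    ∀ (n : Nat) (lo hi : Int), (hi - lo).toNat = n → 0 ≤ lo → lo ≤ hi → hi ≤ (q.length : Int) →
    (∀ j : Nat, j < lo.toNat → lexLt (q.getD j (0, 0)) x) →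
    (∀ j : Nat, hi.toNat ≤ j → j < q.length → ¬ lexLt (q.getD j (0, 0)) x) →
    ∃ p : Nat, bisect q x lo hi = (p : Int) ∧ p ≤ q.length ∧
      (∀ j : Nat, j < p → lexLt (q.getD j (0, 0)) x) ∧
      (∀ j : Nat, p ≤ j → j < q.length → ¬ lexLt (q.getD j (0, 0)) x) := by
  intro n
  induction n using Nat.strong_induction_on with
  | _ n ih =>
    intro lo hi hn h0 hle hhi hlow hhigh
    by_cases hlt : lo < hi
    · have hmidb1 := (PySem.Int.le_floordiv_iff_mul_le (a := lo + hi) (b := 2) (q := lo) (by norm_num)).mpr (by omega)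
      have hmidb2 := (PySem.Int.floordiv_lt_iff_lt_mul (a := lo + hi) (b := 2) (q := hi) (by norm_num)).mpr (by omega)
      have hmr0 : (0 : Int) ≤ PySem.Int.floordiv (lo + hi) 2 := by omega
      have hmrl : PySem.Int.floordiv (lo + hi) 2 < (q.length : Int) := by omega
      have hget : PySem.List.pyGetD q (PySem.Int.floordiv (lo + hi) 2) (0, 0)
          = q.getD (PySem.Int.floordiv (lo + hi) 2).toNat (0, 0) := by
        rw [PySem.List.pyGetD_eq_getElem q (0, 0) hmr0 hmrl,
          List.getD_eq_getElem _ _ (by omega)]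
      rw [bisect.eq_def]
      rw [dif_pos hlt]
      simp only [hget]
      by_cases hc : lexLt (q.getD (PySem.Int.floordiv (lo + hi) 2).toNat (0, 0)) x
      · rw [if_pos (by unfold lexLt at hc; exact hc)]
        refine ih (hi - (PySem.Int.floordiv (lo + hi) 2 + 1)).toNat (by omega)
          (PySem.Int.floordiv (lo + hi) 2 + 1) hi rfl (by omega) (by omega) hhi ?_ hhigh
        intro j hj
        rcases Nat.lt_or_ge j lo.toNat with h | h
        · exact hlow j h
        · refine lexLe_lexLt_trans _ _ _ (getD_mono q hq j (PySem.Int.floordiv (lo + hi) 2).toNat (by omega) (by omega)) hc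
      · rw [if_neg (by unfold lexLt at hc; exact hc)]
        refine ih (PySem.Int.floordiv (lo + hi) 2 - lo).toNat (by omega)
          lo (PySem.Int.floordiv (lo + hi) 2) rfl h0 (by omega) (by omega) hlow ?_
        intro j hj hjl hcontra
        exact hc (lexLe_lexLt_trans _ _ _ (getD_mono q hq (PySem.Int.floordiv (lo + hi) 2).toNat j (by omega) hjl) hcontra)
    · rw [bisect.eq_def, dif_neg hlt]
      refine ⟨lo.toNat, by omega, by omega, hlow, ?_⟩
      intro j hj hjl
      exact hhigh j (by omega) hjl

-- inserting at a bisect_left position of a sorted list IS the stable full re-sort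
theorem insert_eq_sorted2 (q : List (Int × Int)) (x : Int × Int) (hq : q.Pairwise lexLe) (p : Nat)
    (hp : p ≤ q.length)
    (hlow : ∀ j : Nat, j < p → lexLt (q.getD j (0, 0)) x)
    (hhigh : ∀ j : Nat, p ≤ j → j < q.length → ¬ lexLt (q.getD j (0, 0)) x) :
    PySem.List.insert q (p : Int) x
      = PySem.List.sorted2 (x :: q) (fun y => y.1) (fun y => y.2) false := by
  rw [PySem.List.insert_natCast q p x hp]
  have hxle : ∀ b ∈ q.drop p, lexLe x b := by
    intro b hb
    rcases List.mem_iff_getElem.mp hb with ⟨k, hk, hbk⟩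
    have hlen : p + k < q.length := by
      have := hk; simp [List.length_drop] at this; omega
    have : b = q.getD (p + k) (0, 0) := by
      rw [List.getD_eq_getElem _ _ hlen, ← hbk, List.getElem_drop]
    rw [this]
    exact not_lexLt _ _ (hhigh (p + k) (by omega) hlen)
  have htle : ∀ a ∈ q.take p, lexLe a x := by
    intro a ha
    rcases List.mem_iff_getElem.mp ha with ⟨k, hk, hak⟩
    have hkp : k < p := by
      have := hk; simp [List.length_take] at this; omega
    have hkl : k < q.length := by omega
    have : a = q.getD k (0, 0) := by
      rw [List.getD_eq_getElem _ _ hkl, ← hak, List.getElem_take]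
    rw [this]
    exact lexLt_le _ _ (hlow k hkp)
  refine (eq_of_perm_of_pairwise _ _ ?_ (sorted2_pairwise_lex _) ?_).symm
  · refine (PySem.List.sorted2_perm _ _ _ _).trans ?_
    refine List.Perm.symm ?_
    have := @List.perm_middle _ x (q.take p) (q.drop p)
    rw [List.take_append_drop] at this
    exact this
  · rw [List.pairwise_append]
    refine ⟨hq.sublist (List.take_sublist _ _), ?_, ?_⟩
    · refine List.Pairwise.cons hxle (hq.sublist (List.drop_sublist _ _))
    · intro a ha b hb
      rcases List.mem_cons.mp hb with hb | hb
      · exact hb ▸ htle a ha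
      · exact lexLe_trans _ _ _ (htle a ha) (hxle b hb)

-- A's counted loop followed by the final popleft equals B's while-loop
theorem loop_agree (n : Nat) : ∀ (que : List (Int × Int)) (ans : List Int),
    que.Pairwise lexLe → que.length = n + 1 →
    aFinish (aLoop n (ans, que)) = altLoop ans que := by
  induction n with
  | zero =>
    intro que ans _ hlen
    match que, hlen with
    | [m], _ => simp [aLoop, aFinish, altLoop]
  | succ n ih =>
    intro que ans hp hlen
    match que, hlen with
    | a :: b :: rest, hlen =>
      rcases hp with _ | ⟨ha, hp'⟩
      rcases hp' with _ | ⟨hb, hrest⟩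
      by_cases hab : a.1 = b.1
      · obtain ⟨p, hbp, hpl, hlow, hhigh⟩ := bisect_spec rest (b.1 + 1, b.2) hrest
          rest.length 0 (rest.length : Int) (by omega) (by omega) (by omega) (by omega)
          (by intro j hj; exact absurd hj (by omega)) (by intro j hj hjl; exact absurd hjl (by omega))
        have hins : PySem.List.insert rest (bisect rest (b.1 + 1, b.2) 0 (PySem.List.len rest)) (b.1 + 1, b.2)
            = PySem.List.sorted2 ((b.1 + 1, b.2) :: rest) (fun y => y.1) (fun y => y.2) false := by
          rw [PySem.List.len_eq, hbp]
          exact insert_eq_sorted2 rest (b.1 + 1, b.2) hrest p hpl hlow hhigh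
        have hstep : aStep (ans, a :: b :: rest) =
            (ans ++ [a.2], PySem.List.insert rest (bisect rest (b.1 + 1, b.2) 0 (PySem.List.len rest)) (b.1 + 1, b.2)) := by
          simp only [aStep, hab, beq_self_eq_true, if_true, hins]
        have hlen' : (PySem.List.insert rest (bisect rest (b.1 + 1, b.2) 0 (PySem.List.len rest)) (b.1 + 1, b.2)).length = n + 1 := by
          rw [PySem.List.length_insert]; simpa using hlen
        have hpw : (PySem.List.insert rest (bisect rest (b.1 + 1, b.2) 0 (PySem.List.len rest)) (b.1 + 1, b.2)).Pairwise lexLe := by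
          rw [hins]; exact sorted2_pairwise_lex _
        have := ih _ (ans ++ [a.2]) hpw hlen'
        simp only [aLoop, hstep]
        rw [altLoop]
        simp only [hab, beq_self_eq_true, if_true]
        exact this
      · have hpair : (a :: rest).Pairwise lexLe := by
          refine List.Pairwise.cons ?_ hrest
          intro z hz
          exact lexLe_trans _ _ _ (ha b (by simp)) (hb z hz)
        have hstep : aStep (ans, a :: b :: rest) = (ans ++ [b.2], a :: rest) := by
          simp only [aStep, beq_iff_eq, hab, if_false]
          rw [sorted2_eq_self _ hpair]
        have hlen' : (a :: rest).length = n + 1 := by simpa using hlen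
        have := ih (a :: rest) (ans ++ [b.2]) hpair hlen'
        simp only [aLoop, hstep]
        rw [altLoop]
        simp only [beq_iff_eq, hab, if_false]
        exact this

-- A's pairing loop builds exactly zip t r (when len t ≤ len r)
theorem build_eq_zip (t r : List Int) (h : t.length ≤ r.length) :
    (PySem.List.pyRange 0 (PySem.List.len t) 1).foldl
      (fun acc i => acc ++ [(PySem.List.pyGetD t i 0, PySem.List.pyGetD r i 0)]) []
    = t.zip r := by
  rw [PySem.List.foldl_append_singleton_eq_map]
  simp only [PySem.List.len_eq, List.nil_append]
  rw [PySem.List.pyRange_zero_natCast]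
  apply List.ext_getElem
  · simp [List.length_zip]; omega
  · intro i h₁ h₂
    simp only [List.getElem_map, List.getElem_range, List.getElem_zip]
    simp only [List.length_map, List.length_range] at h₁
    rw [PySem.List.pyGetD_natCast, PySem.List.pyGetD_natCast]
    simp [h₁, Nat.lt_of_lt_of_le h₁ h]

-- ===== VERDICT (by name: the statement is the Claim_ definition above) =====
theorem solution_spec : Claim_equal_solution := by
  intro t r _ hpre
  rcases hpre with ⟨hne, hlen⟩
  unfold Spec_solution solution solution_alt
  rw [build_eq_zip t r hlen]
  have hq : (PySem.List.sorted2 (t.zip r) (fun x => x.1) (fun x => x.2) false).length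
      = t.length := by
    rw [(PySem.List.sorted2_perm _ _ _ _).length_eq, List.length_zip]
    omega
  have hpos : 1 ≤ t.length := by
    cases t with
    | nil => exact absurd rfl hne
    | cons x xs => simp
  have hlen1 : (PySem.List.sorted2 (t.zip r) (fun x => x.1) (fun x => x.2) false).length
      = (t.length - 1) + 1 := by omega
  have := loop_agree (t.length - 1)
    (PySem.List.sorted2 (t.zip r) (fun x => x.1) (fun x => x.2) false) []
    (sorted2_pairwise_lex _) hlen1
  rw [hq]
  exact this
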